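-- pv_equiv track=rewrite | github.com/AnuragU03/STT | ai_engine.py | _remap_speaker_labels
-- ===== SOURCE A (Python) =====
-- def _remap_speaker_labels(results: list) -> list:
--     """Remap speaker IDs to clean sequential Guest-1, Guest-2, ... labels."""
--     speaker_map = {}
--     counter = 1
--     for seg in results:
--         spk = seg.get("speaker")
--         if spk and spk not in speaker_map:
--             speaker_map[spk] = f"Guest-{counter}"
--             counter += 1
--     for seg in results:
--         if seg.get("speaker") in speaker_map:
--             seg["speaker"] = speaker_map[seg["speaker"]]
--     return results
-- ===== SOURCE B (Python) =====
-- def _remap_speaker_labels(results: list) -> list: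
--     """Single pass: assign Guest-N labels in first-appearance order as we go."""
--     speaker_map = {}
--     for seg in results:
--         spk = seg.get("speaker")
--         if spk:
--             seg["speaker"] = speaker_map.setdefault(spk, f"Guest-{len(speaker_map) + 1}")
--     return results
-- ===== Notes on version B (the rewrite author's own statement) =====
-- stated objective: simpler
-- what changed: Replaces A's two passes (first build the full speaker map with an explicit counter, then remap every segment) by one single pass that assigns labels on first appearance via dict.setdefault keyed off len(speaker_map), remapping each segment as it is visited.
import Mathlib
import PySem

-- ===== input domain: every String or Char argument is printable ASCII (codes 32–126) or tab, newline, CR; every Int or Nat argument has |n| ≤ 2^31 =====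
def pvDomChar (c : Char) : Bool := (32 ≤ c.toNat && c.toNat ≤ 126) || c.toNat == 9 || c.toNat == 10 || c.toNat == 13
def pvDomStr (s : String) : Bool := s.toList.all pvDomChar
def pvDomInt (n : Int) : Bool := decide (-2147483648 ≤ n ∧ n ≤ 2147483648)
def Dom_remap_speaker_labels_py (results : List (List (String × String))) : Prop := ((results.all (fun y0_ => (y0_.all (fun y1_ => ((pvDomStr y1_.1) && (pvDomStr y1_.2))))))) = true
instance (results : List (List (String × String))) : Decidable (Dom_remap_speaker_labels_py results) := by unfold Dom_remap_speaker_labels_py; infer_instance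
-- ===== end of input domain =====

-- B replaces A's two passes by a single setdefault-driven pass; objective: simpler.
-- Return-value equivalence only: both Pythons also mutate the segment dicts in place (identically).


-- ===== PORT A =====
-- first loop of A: state = (speaker_map, counter)
def pvAStep (st : PySem.Dict String String × Int) (seg : List (String × String)) :
    PySem.Dict String String × Int :=
  match (PySem.Dict.mk seg).get? "speaker" with
  | some spk =>
      if spk ≠ "" ∧ st.1.contains spk = false then
        (st.1.insert spk ("Guest-" ++ PySem.Int.toStr st.2), st.2 + 1)
      else st
  | none => st

-- body of A's second loop: 'if seg.get("speaker") in speaker_map: seg["speaker"] = speaker_map[...]'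
def pvRemapSeg (m : PySem.Dict String String) (seg : List (String × String)) :
    List (String × String) :=
  match (PySem.Dict.mk seg).get? "speaker" with
  | some spk =>
      if m.contains spk then ((PySem.Dict.mk seg).insert "speaker" (m.getD spk "")).items else seg
  | none => seg

def remap_speaker_labels_py (results : List (List (String × String))) :
    List (List (String × String)) :=
  let m := (results.foldl pvAStep (PySem.Dict.empty, 1)).1
  results.map (fun seg => pvRemapSeg m seg)

-- ===== PORT B =====
-- B's single loop: state = (output so far, speaker_map); setdefault assigns Guest-(len+1) on first appearance
def pvBStep (st : List (List (String × String)) × PySem.Dict String String)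
    (seg : List (String × String)) :
    List (List (String × String)) × PySem.Dict String String :=
  match (PySem.Dict.mk seg).get? "speaker" with
  | some spk =>
      if spk ≠ "" then
        let m := st.2.setdefault spk ("Guest-" ++ PySem.Int.toStr ((st.2.size : Int) + 1))
        (st.1 ++ [((PySem.Dict.mk seg).insert "speaker" (m.getD spk "")).items], m)
      else (st.1 ++ [seg], st.2)
  | none => (st.1 ++ [seg], st.2)

def remap_speaker_labels_py_alt (results : List (List (String × String))) :
    List (List (String × String)) :=
  (results.foldl pvBStep ([], PySem.Dict.empty)).1

-- ===== PRECONDITION & SPEC =====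
def Spec_remap_speaker_labels_py (results : List (List (String × String))) (out : List (List (String × String))) : Prop := out = remap_speaker_labels_py_alt results
instance (results : List (List (String × String))) (out : List (List (String × String))) : Decidable (Spec_remap_speaker_labels_py results out) := by unfold Spec_remap_speaker_labels_py; infer_instance

-- ===== CLAIM (what is proved, stated in full; the proofs are below) =====
def Claim_equal_remap_speaker_labels_py : Prop := ∀ (results : List (List (String × String))), Dom_remap_speaker_labels_py results → Spec_remap_speaker_labels_py results (remap_speaker_labels_py results)

-- ===== LEMMAS AND PROOFS =====

-- the common map evolution: both A's first loop and B's setdefault perform this on the map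
def pvMStep (d : PySem.Dict String String) (seg : List (String × String)) :
    PySem.Dict String String :=
  match (PySem.Dict.mk seg).get? "speaker" with
  | some spk =>
      if spk ≠ "" then d.setdefault spk ("Guest-" ++ PySem.Int.toStr ((d.size : Int) + 1)) else d
  | none => d

theorem pvMStep_get? (d : PySem.Dict String String) (seg : List (String × String))
    (k : String) (v : String) (h : d.get? k = some v) : (pvMStep d seg).get? k = some v := by
  unfold pvMStep
  cases hg : (PySem.Dict.mk seg).get? "speaker" with
  | none => exact h
  | some spk =>
      dsimp only
      by_cases hs : spk ≠ ""
      · rw [if_pos hs]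
        by_cases hc : d.contains spk = true
        · rw [PySem.Dict.setdefault_of_contains _ _ hc]; exact h
        · rw [PySem.Dict.setdefault_of_not_contains _ _ (by simpa using hc)]
          have hk : k ≠ spk := by
            intro he; subst he
            rw [PySem.Dict.contains_eq_isSome_get?, h] at hc; simp at hc
          rw [PySem.Dict.get?_insert_of_ne _ _ hk]; exact h
      · rw [if_neg hs]; exact h

theorem pvMStep_fold_get? (l : List (List (String × String))) (d : PySem.Dict String String)
    (k : String) (v : String) (h : d.get? k = some v) :
    (l.foldl pvMStep d).get? k = some v := by
  induction l generalizing d with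
  | nil => exact h
  | cons s rest ih => exact ih _ (pvMStep_get? d s k v h)

theorem pvMStep_contains_nil (d : PySem.Dict String String) (seg : List (String × String)) :
    (pvMStep d seg).contains "" = d.contains "" := by
  unfold pvMStep
  cases hg : (PySem.Dict.mk seg).get? "speaker" with
  | none => rfl
  | some spk =>
      dsimp only
      by_cases hs : spk ≠ ""
      · rw [if_pos hs]
        by_cases hc : d.contains spk = true
        · rw [PySem.Dict.setdefault_of_contains _ _ hc]
        · rw [PySem.Dict.setdefault_of_not_contains _ _ (by simpa using hc)]
          rw [PySem.Dict.contains_insert]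
          have : ("" == spk) = false := by simpa using (Ne.symm hs)
          simp [this]
      · rw [if_neg hs]

theorem pvMStep_fold_contains_nil (l : List (List (String × String)))
    (d : PySem.Dict String String) :
    (l.foldl pvMStep d).contains "" = d.contains "" := by
  induction l generalizing d with
  | nil => rfl
  | cons s rest ih => rw [List.foldl_cons, ih, pvMStep_contains_nil]

theorem pvAStep_eq (d : PySem.Dict String String) (s : List (String × String)) :
    pvAStep (d, (d.size : Int) + 1) s = (pvMStep d s, ((pvMStep d s).size : Int) + 1) := by
  unfold pvAStep pvMStep
  cases hg : (PySem.Dict.mk s).get? "speaker" with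
  | none => rfl
  | some spk =>
      dsimp only
      by_cases hs : spk ≠ ""
      · rw [if_pos hs]
        by_cases hc : d.contains spk = true
        · rw [if_neg (by simp [hc]), PySem.Dict.setdefault_of_contains _ _ hc]
        · have hc' : d.contains spk = false := by simpa using hc
          rw [if_pos ⟨hs, hc'⟩, PySem.Dict.setdefault_of_not_contains _ _ hc']
          have hsz : (d.insert spk ("Guest-" ++ PySem.Int.toStr ((d.size : Int) + 1))).size
              = d.size + 1 := by
            rw [PySem.Dict.size_insert]; simp [hc']
          have h2 : ((d.insert spk ("Guest-" ++ PySem.Int.toStr ((d.size : Int) + 1))).size : Int)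
              + 1 = (d.size : Int) + 1 + 1 := by rw [hsz]; push_cast; ring
          rw [h2]
      · rw [if_neg hs, if_neg (by simp at hs; simp [hs])]

theorem pvAStep_fold_eq (l : List (List (String × String))) (d : PySem.Dict String String) :
    l.foldl pvAStep (d, (d.size : Int) + 1)
      = (l.foldl pvMStep d, ((l.foldl pvMStep d).size : Int) + 1) := by
  induction l generalizing d with
  | nil => rfl
  | cons s rest ih => rw [List.foldl_cons, pvAStep_eq, ih, List.foldl_cons]

theorem pvBStep_fold_eq (l : List (List (String × String)))
    (acc : List (List (String × String))) (d : PySem.Dict String String)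
    (hd : d.contains "" = false) :
    (l.foldl pvBStep (acc, d)).1 = acc ++ l.map (pvRemapSeg (l.foldl pvMStep d)) := by
  induction l generalizing acc d with
  | nil => simp
  | cons s rest ih =>
      rw [List.foldl_cons, List.foldl_cons]
      cases hg : (PySem.Dict.mk s).get? "speaker" with
      | none =>
          have hb : pvBStep (acc, d) s = (acc ++ [s], d) := by unfold pvBStep; rw [hg]
          have hm : pvMStep d s = d := by unfold pvMStep; rw [hg]
          rw [hb, ih _ _ hd, hm]
          have hr : pvRemapSeg (rest.foldl pvMStep d) s = s := by unfold pvRemapSeg; rw [hg]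
          simp [hr]
      | some spk =>
          by_cases hs : spk ≠ ""
          · set g := "Guest-" ++ PySem.Int.toStr ((d.size : Int) + 1) with hgdef
            set d' := d.setdefault spk g with hd'def
            have hb : pvBStep (acc, d) s
                = (acc ++ [((PySem.Dict.mk s).insert "speaker" (d'.getD spk "")).items], d') := by
              unfold pvBStep; rw [hg]; simp [hs, hd'def, hgdef]
            have hm : pvMStep d s = d' := by unfold pvMStep; rw [hg]; simp [hs, hd'def, hgdef]
            have hd'nil : d'.contains "" = false := by
              rw [← hm, pvMStep_contains_nil]; exact hd
            rw [hb, ih _ _ hd'nil, hm]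
            -- the head segment: B's remapping equals A's remapping with the final map
            have hget : d'.get? spk = some ((d.get? spk).getD g) :=
              PySem.Dict.get?_setdefault_self _ _ _
            have hM : (rest.foldl pvMStep d').get? spk = some ((d.get? spk).getD g) :=
              pvMStep_fold_get? _ _ _ _ hget
            have hMc : (rest.foldl pvMStep d').contains spk = true := by
              rw [PySem.Dict.contains_eq_isSome_get?, hM]; rfl
            have hMd : (rest.foldl pvMStep d').getD spk "" = (d.get? spk).getD g :=
              PySem.Dict.getD_of_get?_eq_some _ _ hM
            have hd'd : d'.getD spk "" = (d.get? spk).getD g :=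
              PySem.Dict.getD_of_get?_eq_some _ _ hget
            have hr : pvRemapSeg (rest.foldl pvMStep d') s
                = ((PySem.Dict.mk s).insert "speaker" (d'.getD spk "")).items := by
              unfold pvRemapSeg; rw [hg]; simp [hMc, hMd, hd'd]
            simp [hr]
          · have hs' : spk = "" := by simpa using hs
            have hb : pvBStep (acc, d) s = (acc ++ [s], d) := by
              unfold pvBStep; rw [hg]; simp [hs']
            have hm : pvMStep d s = d := by unfold pvMStep; rw [hg]; simp [hs']
            rw [hb, ih _ _ hd, hm]
            have hc0 : (rest.foldl pvMStep d).contains "" = false := by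
              rw [pvMStep_fold_contains_nil]; exact hd
            have hr : pvRemapSeg (rest.foldl pvMStep d) s = s := by
              unfold pvRemapSeg; rw [hg, hs']; simp [hc0]
            simp [hr]

-- ===== VERDICT (by name: the statement is the Claim_ definition above) =====
theorem remap_speaker_labels_py_spec : Claim_equal_remap_speaker_labels_py := by
  intro results _
  unfold Spec_remap_speaker_labels_py remap_speaker_labels_py remap_speaker_labels_py_alt
  have h0 : ((PySem.Dict.empty : PySem.Dict String String), (1 : Int))
      = (PySem.Dict.empty, ((PySem.Dict.empty : PySem.Dict String String).size : Int) + 1) := by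
    simp [PySem.Dict.size_empty]
  rw [h0, pvAStep_fold_eq, pvBStep_fold_eq _ _ _ (PySem.Dict.contains_empty _)]
  simp
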